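-- pv_equiv track=rewrite | github.com/magnusmoan/IT3105 | Project 1/Python/utils.py | generate_neighborhood_with_fitness
-- ===== SOURCE A (Python) =====
-- def fitness(solution, max_fitness):
--     conflicts = 0
--     for col, row in enumerate(solution):
--         conflicts += diagonal_conflict_count(row, col, solution)
--     return max_fitness - conflicts
--
-- def diagonal_conflict_count(row, col, solution):
--     conflicts = 0
--     for c_col, c_row in enumerate(solution[col:],col):
--         if (c_row == row and c_col == col):
--             continue
--
--         if abs(c_row - row) == abs(c_col - col):
--             conflicts += 1
--
--     return conflicts
--
-- def generate_neighborhood_with_fitness(board, max_fitness, n):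
--     neighborhood = []
--     n -= 1
--     for index1, element1 in enumerate(board):
--         for index2, element2 in enumerate(board[index1+1:], index1+1):
--             neighbor = board[:index1] + (element2,) + board[index1+1:index2] + (element1,) + board[index2+1:]
--             neighborhood.append((neighbor, fitness(neighbor, max_fitness)))
--     return neighborhood
-- ===== SOURCE B (Python) =====
-- # B: computes the pair-conflict count of the board once and derives each neighbor's
-- # fitness by an O(n) incremental delta for the two swapped columns, instead of
-- # recounting all conflicts of every neighbor from scratch.
--
-- def _base_conflicts(board):
--     m = len(board)
--     base = 0
--     for p in range(m):
--         for q in range(p + 1, m):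
--             if abs(board[p] - board[q]) == q - p:
--                 base += 1
--     return base
--
-- def _swap_delta(board, i, j, a, b):
--     delta = 0
--     for k in range(len(board)):
--         if k == i or k == j:
--             continue
--         c = board[k]
--         if abs(c - a) == abs(k - i):
--             delta -= 1
--         if abs(c - b) == abs(k - j):
--             delta -= 1
--         if abs(c - b) == abs(k - i):
--             delta += 1
--         if abs(c - a) == abs(k - j):
--             delta += 1
--     return delta
--
-- def generate_neighborhood_with_fitness(board, max_fitness, n):
--     m = len(board)
--     base = _base_conflicts(board)
--     neighborhood = []
--     for i in range(m):
--         for j in range(i + 1, m):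
--             a = board[i]
--             b = board[j]
--             neighbor = board[:i] + (b,) + board[i+1:j] + (a,) + board[j+1:]
--             neighborhood.append((neighbor, max_fitness - (base + _swap_delta(board, i, j, a, b))))
--     return neighborhood
-- ===== Notes on version B (the rewrite author's own statement) =====
-- stated objective: faster
-- what changed: B counts the board's diagonal-conflict pairs once and computes each swap-neighbor's fitness by an O(n) incremental delta over the two swapped columns, instead of A's full O(n^2) conflict recount for every neighbor.
import Mathlib
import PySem

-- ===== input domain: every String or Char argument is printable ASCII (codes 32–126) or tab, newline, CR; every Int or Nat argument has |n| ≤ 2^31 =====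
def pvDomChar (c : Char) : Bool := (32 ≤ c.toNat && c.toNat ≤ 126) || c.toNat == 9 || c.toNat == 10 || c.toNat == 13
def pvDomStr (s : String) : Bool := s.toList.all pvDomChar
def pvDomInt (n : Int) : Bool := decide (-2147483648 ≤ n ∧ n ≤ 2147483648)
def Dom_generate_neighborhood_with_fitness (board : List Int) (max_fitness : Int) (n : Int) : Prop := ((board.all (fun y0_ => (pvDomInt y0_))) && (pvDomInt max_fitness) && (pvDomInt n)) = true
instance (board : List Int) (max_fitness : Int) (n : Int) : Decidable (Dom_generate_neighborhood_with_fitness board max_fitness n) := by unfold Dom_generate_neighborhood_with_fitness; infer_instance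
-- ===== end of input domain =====

-- B counts the board's diagonal-conflict pairs once and gets each swap-neighbor's
-- fitness via an O(n) incremental delta for the two swapped columns (faster); A
-- recounts all conflicts of every neighbor from scratch.

-- ===== PORT A =====
def diagonal_conflict_count (row : Int) (col : Int) (solution : List Int) : Int :=
  (PySem.List.enumerate (PySem.List.slice solution (some col) none) col).foldl
    (fun conflicts cc =>
      if cc.2 = row ∧ cc.1 = col then conflicts
      else if |cc.2 - row| = |cc.1 - col| then conflicts + 1
      else conflicts) 0

def fitness (solution : List Int) (max_fitness : Int) : Int :=
  let conflicts := (PySem.List.enumerate solution 0).foldl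
    (fun conflicts cr => conflicts + diagonal_conflict_count cr.2 cr.1 solution) 0
  max_fitness - conflicts

def generate_neighborhood_with_fitness (board : List Int) (max_fitness : Int) (n : Int) : List (List Int × Int) :=
  let _n := n - 1
  (PySem.List.enumerate board 0).foldl (fun neighborhood ie1 =>
    (PySem.List.enumerate (PySem.List.slice board (some (ie1.1 + 1)) none) (ie1.1 + 1)).foldl
      (fun neighborhood ie2 =>
        let neighbor := PySem.List.slice board none (some ie1.1) ++ [ie2.2]
          ++ PySem.List.slice board (some (ie1.1 + 1)) (some ie2.1) ++ [ie1.2]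
          ++ PySem.List.slice board (some (ie2.1 + 1)) none
        neighborhood ++ [(neighbor, fitness neighbor max_fitness)]) neighborhood) []

-- ===== PORT B =====
def pvBaseConflicts (board : List Int) : Int :=
  (List.range board.length).foldl (fun base p =>
    (List.range' (p+1) (board.length - (p+1))).foldl (fun base q =>
      if |board.getD p 0 - board.getD q 0| = (q : Int) - (p : Int) then base + 1 else base) base) 0

def pvSwapDelta (board : List Int) (i j : Nat) (a b : Int) : Int :=
  (List.range board.length).foldl (fun delta k =>
    if k = i ∨ k = j then delta
    else
      let c := board.getD k 0
      let delta := if |c - a| = |(k : Int) - (i : Int)| then delta - 1 else delta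
      let delta := if |c - b| = |(k : Int) - (j : Int)| then delta - 1 else delta
      let delta := if |c - b| = |(k : Int) - (i : Int)| then delta + 1 else delta
      if |c - a| = |(k : Int) - (j : Int)| then delta + 1 else delta) 0

def generate_neighborhood_with_fitness_alt (board : List Int) (max_fitness : Int) (_n : Int) : List (List Int × Int) :=
  let m := board.length
  let base := pvBaseConflicts board
  (List.range m).foldl (fun neighborhood i =>
    (List.range' (i+1) (m - (i+1))).foldl (fun neighborhood j =>
      let a := board.getD i 0
      let b := board.getD j 0
      let neighbor := board.take i ++ [b] ++ ((board.drop (i+1)).take (j - (i+1))) ++ [a] ++ board.drop (j+1)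
      neighborhood ++ [(neighbor, max_fitness - (base + pvSwapDelta board i j a b))]) neighborhood) []

-- ===== PRECONDITION & SPEC =====
def Spec_generate_neighborhood_with_fitness (board : List Int) (max_fitness : Int) (n : Int) (out : List (List Int × Int)) : Prop := out = generate_neighborhood_with_fitness_alt board max_fitness n
instance (board : List Int) (max_fitness : Int) (n : Int) (out : List (List Int × Int)) : Decidable (Spec_generate_neighborhood_with_fitness board max_fitness n out) := by unfold Spec_generate_neighborhood_with_fitness; infer_instance

-- ===== CLAIM (what is proved, stated in full; the proofs are below) =====
def Claim_equal_generate_neighborhood_with_fitness : Prop := ∀ (board : List Int) (max_fitness : Int) (n : Int), Dom_generate_neighborhood_with_fitness board max_fitness n → Spec_generate_neighborhood_with_fitness board max_fitness n (generate_neighborhood_with_fitness board max_fitness n)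

-- ===== LEMMAS AND PROOFS =====
-- 0/1 indicator of a diagonal conflict between values x, y at column distance d
def pvE (x y d : Int) : Int := if |x - y| = d then 1 else 0

-- conflict indicator for columns p, q of b
def pvEE (b : List Int) (p q : Nat) : Int := pvE (b.getD p 0) (b.getD q 0) |(q : Int) - (p : Int)|

-- total number of conflicting pairs p < q below m
def pvC (b : List Int) (m : Nat) : Int :=
  ∑ p ∈ Finset.range m, ∑ q ∈ Finset.range m, if p < q then pvEE b p q else 0

def pvF (b : List Int) (p q : Nat) : Int := if p = q then 0 else pvEE b p q

def pvRow (b : List Int) (m p : Nat) : Int := ∑ q ∈ Finset.range m, pvF b p q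

def pvU (b : List Int) (m : Nat) : Int := ∑ p ∈ Finset.range m, pvRow b m p

-- the swapped board
def pvNb (board : List Int) (i j : Nat) : List Int :=
  board.take i ++ [board.getD j 0] ++ ((board.drop (i+1)).take (j - (i+1))) ++ [board.getD i 0] ++ board.drop (j+1)

def pvElemA (board : List Int) (mf : Int) (i j : Nat) : List Int × Int :=
  (pvNb board i j, fitness (pvNb board i j) mf)

def pvElemB (board : List Int) (mf : Int) (i j : Nat) : List Int × Int :=
  (pvNb board i j, mf - (pvBaseConflicts board + pvSwapDelta board i j (board.getD i 0) (board.getD j 0)))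

-- change at column k caused by column i's value going va → vb
def pvAi (b : List Int) (i : Nat) (va vb : Int) (k : Nat) : Int :=
  pvE (b.getD k 0) vb |(k : Int) - (i : Int)| - pvE (b.getD k 0) va |(k : Int) - (i : Int)|

def pvAj (b : List Int) (j : Nat) (va vb : Int) (k : Nat) : Int :=
  pvE (b.getD k 0) va |(k : Int) - (j : Int)| - pvE (b.getD k 0) vb |(k : Int) - (j : Int)|

def pvDk (b : List Int) (i j : Nat) (va vb : Int) (k : Nat) : Int :=
  if k = i ∨ k = j then 0 else pvAi b i va vb k + pvAj b j va vb k


theorem pv_enum_eq (xs : List Int) (s : Int) :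
    PySem.List.enumerate xs s
      = (List.range xs.length).map (fun k : Nat => (s + (k : Int), xs.getD k 0)) := by
  induction xs generalizing s with
  | nil => simp [PySem.List.enumerate_nil]
  | cons x xs ih =>
      rw [PySem.List.enumerate_cons, ih, List.length_cons, List.range_succ_eq_map]
      simp only [List.map_cons, List.map_map, Nat.cast_zero, add_zero, List.getD_cons_zero]
      refine List.cons_eq_cons.mpr ⟨rfl, ?_⟩
      apply List.map_congr_left
      intro k _
      simp only [Function.comp_apply, List.getD_cons_succ]
      refine Prod.ext ?_ rfl
      show s + 1 + (k : Int) = s + ((k + 1 : Nat) : Int)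
      push_cast; ring

theorem pv_sum_list_range (n : Nat) (f : Nat → Int) :
    ((List.range n).map f).sum = ∑ i ∈ Finset.range n, f i := by
  induction n with
  | zero => simp
  | succ n ih =>
      rw [List.range_succ, Finset.sum_range_succ, List.map_append, List.sum_append, ih]
      simp

theorem pv_getD_drop (l : List Int) (n t : Nat) :
    (l.drop n).getD t 0 = l.getD (n + t) 0 := by
  simp [List.getD_eq_getElem?_getD, List.getElem?_drop]

theorem pv_sum_range_gt (m p : Nat) (f : Nat → Int) :
    (∑ q ∈ Finset.range m, if p < q then f q else 0)
      = ∑ t ∈ Finset.range (m - (p+1)), f (p+1+t) := by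
  rw [← Finset.sum_filter]
  have h : (Finset.range m).filter (fun q => p < q) = Finset.Ico (p+1) m := by
    ext q; simp [Finset.mem_filter, Finset.mem_range, Finset.mem_Ico]; omega
  rw [h, Finset.sum_Ico_eq_sum_range]

theorem pvE_comm (x y d : Int) : pvE x y d = pvE y x d := by
  unfold pvE; rw [abs_sub_comm]

theorem pv_sum_split3 (m i j : Nat) (hne : i ≠ j) (hi : i < m) (hj : j < m) (f : Nat → Int) :
    ∑ p ∈ Finset.range m, f p
      = f i + f j + ∑ p ∈ ((Finset.range m).erase i).erase j, f p := by
  have hi' : i ∈ Finset.range m := Finset.mem_range.mpr hi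
  have hj' : j ∈ (Finset.range m).erase i := by
    simp [Finset.mem_erase, Finset.mem_range, hj]
    omega
  rw [← Finset.add_sum_erase _ f hi', ← Finset.add_sum_erase _ f hj']
  ring

theorem pv_flatMap_congr {α β : Type} (l : List α) (f g : α → List β)
    (h : ∀ x ∈ l, f x = g x) : l.flatMap f = l.flatMap g := by
  induction l with
  | nil => rfl
  | cons x xs ih =>
      rw [List.flatMap_cons, List.flatMap_cons, h x (by simp),
        ih (fun y hy => h y (by simp [hy]))]

theorem pv_foldl_if_add (l : List (Int × Int)) (row col : Int) (init : Int) :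
    l.foldl (fun conflicts cc =>
      if cc.2 = row ∧ cc.1 = col then conflicts
      else if |cc.2 - row| = |cc.1 - col| then conflicts + 1
      else conflicts) init
    = init + (l.map (fun cc => if cc.2 = row ∧ cc.1 = col then 0
        else if |cc.2 - row| = |cc.1 - col| then (1:Int) else 0)).sum := by
  have hbody : (fun (conflicts : Int) (cc : Int × Int) =>
      if cc.2 = row ∧ cc.1 = col then conflicts
      else if |cc.2 - row| = |cc.1 - col| then conflicts + 1
      else conflicts)
      = fun conflicts cc => conflicts + (if cc.2 = row ∧ cc.1 = col then 0
        else if |cc.2 - row| = |cc.1 - col| then (1:Int) else 0) := by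
    funext a cc; split_ifs <;> ring
  rw [hbody, PySem.List.foldl_add]

theorem pv_foldl_if1 {α : Type} (l : List α) (c : α → Prop) [DecidablePred c] (init : Int) :
    l.foldl (fun acc x => if c x then acc + 1 else acc) init
      = init + (l.map (fun x => if c x then (1:Int) else 0)).sum := by
  have hbody : (fun (acc : Int) (x : α) => if c x then acc + 1 else acc)
      = fun acc x => acc + (if c x then (1:Int) else 0) := by
    funext a x; split_ifs <;> ring
  rw [hbody, PySem.List.foldl_add]

theorem pv_U_two (b : List Int) (m : Nat) : pvU b m = 2 * pvC b m := by
  have hF : ∀ p q : Nat, pvF b p q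
      = (if p < q then pvEE b p q else 0) + (if q < p then pvEE b p q else 0) := by
    intro p q
    unfold pvF
    rcases Nat.lt_trichotomy p q with h | h | h
    · rw [if_neg (by omega), if_pos h, if_neg (by omega)]; ring
    · subst h; simp
    · rw [if_neg (by omega), if_neg (by omega), if_pos h]; ring
  unfold pvU pvRow
  have hsplit : ∑ p ∈ Finset.range m, ∑ q ∈ Finset.range m, pvF b p q
      = (∑ p ∈ Finset.range m, ∑ q ∈ Finset.range m, if p < q then pvEE b p q else 0)
        + (∑ p ∈ Finset.range m, ∑ q ∈ Finset.range m, if q < p then pvEE b p q else 0) := by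
    rw [← Finset.sum_add_distrib]
    refine Finset.sum_congr rfl (fun p _ => ?_)
    rw [← Finset.sum_add_distrib]
    exact Finset.sum_congr rfl (fun q _ => hF p q)
  have h2 : (∑ p ∈ Finset.range m, ∑ q ∈ Finset.range m, if q < p then pvEE b p q else 0)
      = ∑ p ∈ Finset.range m, ∑ q ∈ Finset.range m, if p < q then pvEE b p q else 0 := by
    rw [Finset.sum_comm]
    refine Finset.sum_congr rfl (fun p _ => ?_)
    refine Finset.sum_congr rfl (fun q _ => ?_)
    by_cases h : p < q
    · rw [if_pos h, if_pos h]
      unfold pvEE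
      rw [pvE_comm, abs_sub_comm ((p:Int)) ((q:Int))]
    · rw [if_neg h, if_neg h]
  rw [hsplit, h2]
  unfold pvC
  ring

theorem pv_dcc (sol : List Int) (p : Nat) (hp : p < sol.length) :
    diagonal_conflict_count (sol.getD p 0) (p : Int) sol
      = ∑ q ∈ Finset.range sol.length, if p < q then pvEE sol p q else 0 := by
  unfold diagonal_conflict_count
  rw [PySem.List.slice_from_natCast, pv_enum_eq, pv_foldl_if_add, zero_add,
    List.map_map, List.length_drop, pv_sum_list_range, pv_sum_range_gt]
  have hmp : sol.length - p = (sol.length - (p+1)) + 1 := by omega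
  rw [hmp, Finset.sum_range_succ']
  have h0 : (Function.comp (fun cc : Int × Int => if cc.2 = sol.getD p 0 ∧ cc.1 = (p:Int) then 0
      else if |cc.2 - sol.getD p 0| = |cc.1 - (p:Int)| then (1:Int) else 0)
      (fun k : Nat => ((p:Int) + (k:Int), (sol.drop p).getD k 0))) 0 = 0 := by
    simp [Function.comp]
  rw [h0, add_zero]
  refine Finset.sum_congr rfl (fun t _ => ?_)
  simp only [Function.comp_apply, pv_getD_drop]
  have hne : ¬(sol.getD (p + (t+1)) 0 = sol.getD p 0 ∧ ((p:Int) + ((t+1 : Nat):Int)) = (p:Int)) := by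
    rintro ⟨-, h⟩
    push_cast at h
    omega
  rw [if_neg hne]
  unfold pvEE pvE
  have hd1 : ((p:Int) + ((t+1 : Nat):Int) - (p:Int)) = ((t:Int) + 1) := by push_cast; ring
  have hd2 : |(((p+1+t : Nat)):Int) - (p:Int)| = ((t:Int) + 1) := by
    rw [show (((p+1+t : Nat)):Int) - (p:Int) = ((t:Int) + 1) by push_cast; ring]
    exact abs_of_nonneg (by omega)
  rw [hd1, hd2]
  rw [abs_of_nonneg (show (0:Int) ≤ (t:Int) + 1 by omega)]
  rw [abs_sub_comm]
  have hidx : p + (t+1) = p+1+t := by omega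
  rw [hidx]

theorem pv_fitness (sol : List Int) (mf : Int) :
    fitness sol mf = mf - pvC sol sol.length := by
  simp only [fitness]
  rw [pv_enum_eq, List.foldl_map]
  simp only [zero_add]
  rw [PySem.List.foldl_add, zero_add, pv_sum_list_range]
  have h : ∑ k ∈ Finset.range sol.length, diagonal_conflict_count (sol.getD k 0) (k:Int) sol
      = pvC sol sol.length := by
    unfold pvC
    exact Finset.sum_congr rfl (fun p hp => pv_dcc sol p (Finset.mem_range.mp hp))
  rw [h]

theorem pv_base (b : List Int) : pvBaseConflicts b = pvC b b.length := by
  unfold pvBaseConflicts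
  simp only [pv_foldl_if1]
  rw [PySem.List.foldl_add, zero_add, pv_sum_list_range]
  unfold pvC
  refine Finset.sum_congr rfl (fun p _ => ?_)
  rw [pv_sum_range_gt, List.range'_eq_map_range, List.map_map, pv_sum_list_range]
  refine Finset.sum_congr rfl (fun t _ => ?_)
  simp only [Function.comp_apply]
  unfold pvEE pvE
  rw [abs_of_nonneg (show (0:Int) ≤ (((p+1+t : Nat)):Int) - (p:Int) by push_cast; omega)]

theorem pv_delta (b : List Int) (i j : Nat) (va vb : Int) :
    pvSwapDelta b i j va vb = ∑ k ∈ Finset.range b.length, pvDk b i j va vb k := by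
  unfold pvSwapDelta
  have hbody : (fun (delta : Int) (k : Nat) =>
      if k = i ∨ k = j then delta
      else
        let c := b.getD k 0
        let delta := if |c - va| = |(k : Int) - (i : Int)| then delta - 1 else delta
        let delta := if |c - vb| = |(k : Int) - (j : Int)| then delta - 1 else delta
        let delta := if |c - vb| = |(k : Int) - (i : Int)| then delta + 1 else delta
        if |c - va| = |(k : Int) - (j : Int)| then delta + 1 else delta)
      = fun delta k => delta + pvDk b i j va vb k := by
    funext d k
    unfold pvDk pvAi pvAj pvE
    by_cases h : k = i ∨ k = j
    · rw [if_pos h, if_pos h]; ring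
    · rw [if_neg h, if_neg h]
      simp only []
      split_ifs <;> ring
  rw [hbody, PySem.List.foldl_add, zero_add, pv_sum_list_range]

theorem pv_len_nb (b : List Int) (i j : Nat) (hij : i < j) (hj : j < b.length) :
    (pvNb b i j).length = b.length := by
  simp [pvNb]
  omega

theorem pv_getD_nb (b : List Int) (i j : Nat) (hij : i < j) (hj : j < b.length) (k : Nat) :
    (pvNb b i j).getD k 0
      = if k = j then b.getD i 0 else if k = i then b.getD j 0 else b.getD k 0 := by
  have hi : i < b.length := by omega
  have hset : (b.set i (b.getD j 0)).set j (b.getD i 0) = pvNb b i j := by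
    rw [List.set_eq_take_cons_drop (b.getD i 0)
        (show j < (b.set i (b.getD j 0)).length by simp; omega),
      List.set_eq_take_cons_drop (b.getD j 0) hi,
      List.take_append, List.drop_append, List.take_take,
      Nat.min_eq_right (show i ≤ j by omega),
      List.drop_eq_nil_of_le (show (b.take i).length ≤ j + 1 by simp [List.length_take]; omega),
      List.length_take, Nat.min_eq_left (show i ≤ b.length by omega),
      show j - i = (j - (i+1)) + 1 from by omega, List.take_succ_cons,
      show j + 1 - i = ((j - (i+1)) + 1) + 1 from by omega, List.drop_succ_cons]
    have hdd : (b.drop (i+1)).drop ((j - (i+1)) + 1) = b.drop (j+1) := by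
      rw [List.drop_drop]; congr 1; omega
    rw [hdd]
    unfold pvNb
    simp [List.append_assoc]
  rw [← hset]
  by_cases hkj : k = j
  · subst hkj
    rw [if_pos rfl, List.getD_eq_getElem?_getD,
      List.getElem?_set_self (show k < (b.set i (b.getD k 0)).length by simp; omega)]
    rfl
  · rw [if_neg hkj, List.getD_eq_getElem?_getD,
      List.getElem?_set_ne (show j ≠ k from fun h => hkj h.symm)]
    by_cases hki : k = i
    · subst hki
      rw [if_pos rfl, List.getElem?_set_self (show k < b.length by omega)]
      rfl
    · rw [if_neg hki, List.getElem?_set_ne (show i ≠ k from fun h => hki h.symm),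
        ← List.getD_eq_getElem?_getD]

theorem pv_C_swap (b : List Int) (i j : Nat) (hij : i < j) (hj : j < b.length) :
    pvC (pvNb b i j) b.length
      = pvC b b.length + pvSwapDelta b i j (b.getD i 0) (b.getD j 0) := by
  have hne : i ≠ j := by omega
  have hi : i < b.length := by omega
  have hg : ∀ k, (pvNb b i j).getD k 0
      = if k = j then b.getD i 0 else if k = i then b.getD j 0 else b.getD k 0 :=
    pv_getD_nb b i j hij hj
  have hmemE : ∀ p ∈ ((Finset.range b.length).erase i).erase j, p ≠ i ∧ p ≠ j := by
    intro p hp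
    simp [Finset.mem_erase] at hp
    tauto
  have hFee : ∀ p q : Nat, p ≠ i → p ≠ j → q ≠ i → q ≠ j →
      pvF (pvNb b i j) p q = pvF b p q := by
    intro p q hpi hpj hqi hqj
    unfold pvF pvEE
    rw [hg p, hg q, if_neg hpj, if_neg hpi, if_neg hqj, if_neg hqi]
  have hR1 : ∀ p ∈ ((Finset.range b.length).erase i).erase j,
      pvRow (pvNb b i j) b.length p
        = pvRow b b.length p + (pvAi b i (b.getD i 0) (b.getD j 0) p + pvAj b j (b.getD i 0) (b.getD j 0) p) := by
    intro p hp
    obtain ⟨hpi, hpj⟩ := hmemE p hp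
    unfold pvRow
    rw [pv_sum_split3 b.length i j hne hi hj (fun q => pvF (pvNb b i j) p q),
        pv_sum_split3 b.length i j hne hi hj (fun q => pvF b p q)]
    have hS : ∑ q ∈ ((Finset.range b.length).erase i).erase j, pvF (pvNb b i j) p q
        = ∑ q ∈ ((Finset.range b.length).erase i).erase j, pvF b p q := by
      refine Finset.sum_congr rfl (fun q hq => ?_)
      obtain ⟨hqi, hqj⟩ := hmemE q hq
      exact hFee p q hpi hpj hqi hqj
    rw [hS]
    have h1 : pvF (pvNb b i j) p i = pvF b p i + pvAi b i (b.getD i 0) (b.getD j 0) p := by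
      unfold pvF pvEE pvAi pvE
      rw [hg p, hg i, if_neg hpj, if_neg hpi, if_neg hne, if_pos rfl,
        abs_sub_comm ((i:Int)) ((p:Int)), if_neg hpi, if_neg hpi]
      split_ifs <;> ring
    have h2 : pvF (pvNb b i j) p j = pvF b p j + pvAj b j (b.getD i 0) (b.getD j 0) p := by
      unfold pvF pvEE pvAj pvE
      rw [hg p, hg j, if_neg hpj, if_neg hpi, if_pos rfl,
        abs_sub_comm ((j:Int)) ((p:Int)), if_neg hpj, if_neg hpj]
      split_ifs <;> ring
    rw [h1, h2]
    ring
  have hR2 : pvRow (pvNb b i j) b.length i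
      = pvRow b b.length i + ∑ q ∈ ((Finset.range b.length).erase i).erase j,
          pvAi b i (b.getD i 0) (b.getD j 0) q := by
    unfold pvRow
    rw [pv_sum_split3 b.length i j hne hi hj (fun q => pvF (pvNb b i j) i q),
        pv_sum_split3 b.length i j hne hi hj (fun q => pvF b i q)]
    have hii : pvF (pvNb b i j) i i = pvF b i i := by unfold pvF; simp
    have hij' : pvF (pvNb b i j) i j = pvF b i j := by
      unfold pvF pvEE
      rw [hg i, hg j, if_neg hne, if_pos rfl, if_pos rfl, if_neg hne, if_neg hne, pvE_comm]
    have hSq : ∑ q ∈ ((Finset.range b.length).erase i).erase j, pvF (pvNb b i j) i q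
        = ∑ q ∈ ((Finset.range b.length).erase i).erase j,
            (pvF b i q + pvAi b i (b.getD i 0) (b.getD j 0) q) := by
      refine Finset.sum_congr rfl (fun q hq => ?_)
      obtain ⟨hqi, hqj⟩ := hmemE q hq
      have hiq : i ≠ q := fun h => hqi h.symm
      unfold pvF pvEE pvAi pvE
      rw [hg i, hg q, if_neg hne, if_pos rfl, if_neg hqj, if_neg hqi,
        if_neg hiq, if_neg hiq,
        abs_sub_comm (b.getD q 0) (b.getD j 0), abs_sub_comm (b.getD q 0) (b.getD i 0)]
      ring
    rw [hii, hij', hSq, Finset.sum_add_distrib]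
    ring
  have hR3 : pvRow (pvNb b i j) b.length j
      = pvRow b b.length j + ∑ q ∈ ((Finset.range b.length).erase i).erase j,
          pvAj b j (b.getD i 0) (b.getD j 0) q := by
    unfold pvRow
    rw [pv_sum_split3 b.length i j hne hi hj (fun q => pvF (pvNb b i j) j q),
        pv_sum_split3 b.length i j hne hi hj (fun q => pvF b j q)]
    have hjj : pvF (pvNb b i j) j j = pvF b j j := by unfold pvF; simp
    have hji : pvF (pvNb b i j) j i = pvF b j i := by
      unfold pvF pvEE
      have hji' : j ≠ i := hne.symm
      rw [hg j, hg i, if_pos rfl, if_neg hne, if_pos rfl, if_neg hji', if_neg hji', pvE_comm]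
    have hSq : ∑ q ∈ ((Finset.range b.length).erase i).erase j, pvF (pvNb b i j) j q
        = ∑ q ∈ ((Finset.range b.length).erase i).erase j,
            (pvF b j q + pvAj b j (b.getD i 0) (b.getD j 0) q) := by
      refine Finset.sum_congr rfl (fun q hq => ?_)
      obtain ⟨hqi, hqj⟩ := hmemE q hq
      have hjq : j ≠ q := fun h => hqj h.symm
      unfold pvF pvEE pvAj pvE
      rw [hg j, hg q, if_pos rfl, if_neg hqj, if_neg hqi,
        if_neg hjq, if_neg hjq,
        abs_sub_comm (b.getD q 0) (b.getD i 0), abs_sub_comm (b.getD q 0) (b.getD j 0)]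
      ring
    rw [hjj, hji, hSq, Finset.sum_add_distrib]
    ring
  have hU : pvU (pvNb b i j) b.length
      = pvU b b.length
        + 2 * ∑ k ∈ Finset.range b.length, pvDk b i j (b.getD i 0) (b.getD j 0) k := by
    unfold pvU
    rw [pv_sum_split3 b.length i j hne hi hj (fun p => pvRow (pvNb b i j) b.length p),
        pv_sum_split3 b.length i j hne hi hj (fun p => pvRow b b.length p),
        pv_sum_split3 b.length i j hne hi hj (fun k => pvDk b i j (b.getD i 0) (b.getD j 0) k)]
    have hdki : pvDk b i j (b.getD i 0) (b.getD j 0) i = 0 := by simp [pvDk]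
    have hdkj : pvDk b i j (b.getD i 0) (b.getD j 0) j = 0 := by simp [pvDk]
    have hdkE : ∑ k ∈ ((Finset.range b.length).erase i).erase j, pvDk b i j (b.getD i 0) (b.getD j 0) k
        = ∑ k ∈ ((Finset.range b.length).erase i).erase j,
            (pvAi b i (b.getD i 0) (b.getD j 0) k + pvAj b j (b.getD i 0) (b.getD j 0) k) := by
      refine Finset.sum_congr rfl (fun k hk => ?_)
      obtain ⟨hki, hkj⟩ := hmemE k hk
      unfold pvDk
      rw [if_neg (by tauto)]
    have hsumE : ∑ p ∈ ((Finset.range b.length).erase i).erase j, pvRow (pvNb b i j) b.length p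
        = ∑ p ∈ ((Finset.range b.length).erase i).erase j,
            (pvRow b b.length p + (pvAi b i (b.getD i 0) (b.getD j 0) p + pvAj b j (b.getD i 0) (b.getD j 0) p)) :=
      Finset.sum_congr rfl hR1
    rw [hR2, hR3, hdki, hdkj, hdkE, hsumE, Finset.sum_add_distrib, Finset.sum_add_distrib]
    ring
  rw [pv_delta]
  have h1 := pv_U_two (pvNb b i j) b.length
  have h2 := pv_U_two b b.length
  linarith [hU]

theorem pv_A_flat (board : List Int) (mf n : Int) :
    generate_neighborhood_with_fitness board mf n
      = (List.range board.length).flatMap (fun i =>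
          (List.range (board.length - (i+1))).map (fun t => pvElemA board mf i (i+1+t))) := by
  have hc1 : ∀ (a : Nat), (a : Int) + 1 = ((a + 1 : Nat) : Int) := fun a => by push_cast; ring
  have hc2 : ∀ (a b : Nat), (a : Int) + (b : Int) = ((a + b : Nat) : Int) := fun a b => by push_cast; ring
  simp only [generate_neighborhood_with_fitness, pv_enum_eq, List.foldl_map, zero_add,
    hc1, hc2, PySem.List.slice_from_natCast, PySem.List.slice_to_natCast, PySem.List.slice_natCast,
    pv_getD_drop, List.length_drop,
    PySem.List.foldl_append_singleton_eq_map, PySem.List.foldl_append_eq_flatMap, List.nil_append]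
  unfold pvElemA pvNb
  rfl

theorem pv_B_flat (board : List Int) (mf n : Int) :
    generate_neighborhood_with_fitness_alt board mf n
      = (List.range board.length).flatMap (fun i =>
          (List.range (board.length - (i+1))).map (fun t => pvElemB board mf i (i+1+t))) := by
  simp only [generate_neighborhood_with_fitness_alt, List.range'_eq_map_range, List.foldl_map,
    PySem.List.foldl_append_singleton_eq_map, PySem.List.foldl_append_eq_flatMap, List.nil_append]
  unfold pvElemB pvNb
  rfl

theorem pv_elem_eq (board : List Int) (mf : Int) (i j : Nat) (hij : i < j) (hj : j < board.length) :
    pvElemA board mf i j = pvElemB board mf i j := by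
  unfold pvElemA pvElemB
  refine Prod.ext rfl ?_
  show fitness (pvNb board i j) mf
      = mf - (pvBaseConflicts board + pvSwapDelta board i j (board.getD i 0) (board.getD j 0))
  rw [pv_fitness, pv_len_nb board i j hij hj, pv_C_swap board i j hij hj, pv_base]

theorem pv_main (board : List Int) (mf n : Int) :
    generate_neighborhood_with_fitness board mf n
      = generate_neighborhood_with_fitness_alt board mf n := by
  rw [pv_A_flat board mf n, pv_B_flat board mf n]
  refine pv_flatMap_congr _ _ _ (fun i hi => ?_)
  refine List.map_congr_left (fun t ht => ?_)
  rw [List.mem_range] at hi ht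
  exact pv_elem_eq board mf i (i+1+t) (by omega) (by omega)

-- ===== VERDICT (by name: the statement is the Claim_ definition above) =====
theorem generate_neighborhood_with_fitness_spec : Claim_equal_generate_neighborhood_with_fitness := by
  intro board mf n _
  unfold Spec_generate_neighborhood_with_fitness
  exact pv_main board mf n
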